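-- pv_equiv track=rewrite | github.com/NielsVeenstraTue/5SIB0_group2_2024 | ECF/cCALAP.py | convertDep2Pred
-- ===== SOURCE A (Python) =====
-- def convertDep2Pred(dependencies):
--     # Convert dependencies xml to working dictionary format
--     predecessors = []
--     successors = []
--     dictionary = {}
--     for id, task in enumerate(dependencies):
--         predecessors.append(task['pred'])
--         successors.append(task['succ'])
--
--     for pred, succ in zip(predecessors, successors):
--         if succ in dictionary:
--             dictionary[succ].append(pred)
--         else:
--             dictionary[succ] = [pred]
--
--     for key in dictionary:
--         dictionary[key].sort()
--
--     return dictionary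
-- ===== SOURCE B (Python) =====
-- def convertDep2Pred(dependencies):
--     # Alternative decomposition: unique successors in first-appearance order,
--     # then one sorted filtered scan per successor.
--     keys = list(dict.fromkeys(task['succ'] for task in dependencies))
--     return {k: sorted(task['pred'] for task in dependencies if task['succ'] == k)
--             for k in keys}
-- ===== Notes on version B (the rewrite author's own statement) =====
-- stated objective: alternative
-- what changed: Instead of one aggregation pass building lists in a dict followed by in-place sorts, B first dedups the successors in first-appearance order and then builds each sorted predecessor list by a filtered scan per unique successor.
import Mathlib
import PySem

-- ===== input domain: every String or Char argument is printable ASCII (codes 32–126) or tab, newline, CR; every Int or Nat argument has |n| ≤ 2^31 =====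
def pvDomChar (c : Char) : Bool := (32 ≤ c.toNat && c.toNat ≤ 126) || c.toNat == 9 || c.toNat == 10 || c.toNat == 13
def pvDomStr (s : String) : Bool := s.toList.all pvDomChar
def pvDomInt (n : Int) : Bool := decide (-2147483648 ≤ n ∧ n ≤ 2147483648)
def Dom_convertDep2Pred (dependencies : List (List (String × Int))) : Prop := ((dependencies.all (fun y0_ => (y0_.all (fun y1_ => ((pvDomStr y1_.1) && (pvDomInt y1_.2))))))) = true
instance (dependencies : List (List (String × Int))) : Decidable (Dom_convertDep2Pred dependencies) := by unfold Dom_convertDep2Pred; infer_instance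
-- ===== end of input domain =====

-- B groups by the distinct successors (first-appearance order) with one sorted filtered scan
-- per unique successor, instead of A's dict aggregation pass followed by in-place sorts.

-- ===== PORT A =====
-- task['pred'] / task['succ'] (first-match lookup; Pre_ guarantees the key is present)
def pvPred (task : List (String × Int)) : Int := (PySem.Dict.mk task).getD "pred" 0
def pvSucc (task : List (String × Int)) : Int := (PySem.Dict.mk task).getD "succ" 0

def convertDep2Pred (dependencies : List (List (String × Int))) : List (Int × List Int) :=
  let predecessors : List Int := dependencies.foldl (fun acc task => acc ++ [pvPred task]) []
  let successors : List Int := dependencies.foldl (fun acc task => acc ++ [pvSucc task]) []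
  let dictionary : PySem.Dict Int (List Int) :=
    (predecessors.zip successors).foldl
      (fun d ps =>
        if d.contains ps.2 then d.insert ps.2 (d.getD ps.2 [] ++ [ps.1])
        else d.insert ps.2 [ps.1])
      PySem.Dict.empty
  let dictionary₂ :=
    dictionary.keys.foldl
      (fun d key => d.modify key [] (fun v => PySem.List.sorted v (fun x => x) false))
      dictionary
  dictionary₂.items

-- ===== PORT B =====
def convertDep2Pred_alt (dependencies : List (List (String × Int))) : List (Int × List Int) :=
  let keys := PySem.List.dedup (dependencies.map (fun task => pvSucc task))
  keys.map (fun k =>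
    (k, PySem.List.sorted
          ((dependencies.filter (fun task => pvSucc task == k)).map (fun task => pvPred task))
          (fun x => x) false))

-- ===== PRECONDITION & SPEC =====
-- Pre_ excludes exactly the tasks missing a 'pred' or 'succ' key, on which Python A raises KeyError.
def Pre_convertDep2Pred (dependencies : List (List (String × Int))) : Prop :=
  ∀ task ∈ dependencies,
    (PySem.Dict.mk task).contains "pred" = true ∧ (PySem.Dict.mk task).contains "succ" = true
instance (dependencies : List (List (String × Int))) : Decidable (Pre_convertDep2Pred dependencies) := by
  unfold Pre_convertDep2Pred; infer_instance

def pvWitness_convertDep2Pred : (List (List (String × Int))) :=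
  [[("pred", 3), ("succ", 1)], [("pred", 2), ("succ", 1)]]

def Spec_convertDep2Pred (dependencies : List (List (String × Int))) (out : List (Int × List Int)) : Prop := out = convertDep2Pred_alt dependencies
instance (dependencies : List (List (String × Int))) (out : List (Int × List Int)) : Decidable (Spec_convertDep2Pred dependencies out) := by unfold Spec_convertDep2Pred; infer_instance

-- ===== CLAIM (what is proved, stated in full; the proofs are below) =====
def Claim_equal_convertDep2Pred : Prop := ∀ (dependencies : List (List (String × Int))), Dom_convertDep2Pred dependencies → Pre_convertDep2Pred dependencies → Spec_convertDep2Pred dependencies (convertDep2Pred dependencies)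

-- ===== LEMMAS AND PROOFS =====

-- A's aggregation branch is exactly dict.modify with default [].
lemma step_eq_modify :
    (fun (d : PySem.Dict Int (List Int)) (ps : Int × Int) =>
      if d.contains ps.2 then d.insert ps.2 (d.getD ps.2 [] ++ [ps.1])
      else d.insert ps.2 [ps.1])
    = (fun d ps => d.modify ps.2 [] (· ++ [ps.1])) := by
  funext d ps
  have hmod : d.modify ps.2 [] (· ++ [ps.1]) = d.insert ps.2 (d.getD ps.2 [] ++ [ps.1]) := by
    simp [PySem.Dict.modify]
  rw [hmod]
  by_cases h : d.contains ps.2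
  · simp [h]
  · rw [if_neg (by simp [h]), PySem.Dict.getD_of_not_contains d [] (by simpa using h)]
    simp

-- the in-place sort loop: each present key's value gets sorted once
lemma getD_foldl_modify_fun (f : List Int → List Int) (ks : List Int)
    (d : PySem.Dict Int (List Int)) (hnd : ks.Nodup) (k : Int) :
    (ks.foldl (fun d key => d.modify key [] f) d).getD k []
      = if k ∈ ks then f (d.getD k []) else d.getD k [] := by
  induction ks generalizing d with
  | nil => simp
  | cons k0 t ih =>
    simp only [List.foldl_cons]
    rcases List.nodup_cons.mp hnd with ⟨hk0, hnt⟩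
    rw [ih _ hnt, PySem.Dict.getD_modify]
    by_cases hk : k = k0
    · subst hk; simp [hk0]
    · simp [List.mem_cons, hk]

lemma set_update_self (s : PySem.Set Int) : PySem.Set.update s s = s := by
  rw [PySem.Set.update_eq_append_filter]
  have : (PySem.Set.ofList s).filter (fun y => !(PySem.Set.contains s y)) = [] := by
    apply List.filter_eq_nil_iff.mpr
    intro y hy
    have hmem : y ∈ s := (PySem.Set.mem_ofList s y).mp hy
    simp [hmem]
  rw [this, List.append_nil]

theorem convertDep2Pred_eq (dependencies : List (List (String × Int))) :
    convertDep2Pred dependencies = convertDep2Pred_alt dependencies := by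
  unfold convertDep2Pred convertDep2Pred_alt
  simp only [PySem.List.foldl_append_singleton_eq_map, List.nil_append]
  rw [step_eq_modify, List.zip_map']
  -- rewrite the aggregation fold to the (succ, pred)-keyed standard shape
  have hfold :
      (dependencies.map (fun t => (pvPred t, pvSucc t))).foldl
          (fun d ps => d.modify ps.2 [] (· ++ [ps.1])) PySem.Dict.empty
        = (dependencies.map (fun t => (pvSucc t, pvPred t))).foldl
          (fun d p => d.modify p.1 [] (· ++ [p.2])) PySem.Dict.empty := by
    rw [List.foldl_map, List.foldl_map]
  rw [hfold]
  set sw := dependencies.map (fun t => (pvSucc t, pvPred t)) with hsw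
  set d1 := sw.foldl (fun d p => d.modify p.1 [] (· ++ [p.2])) PySem.Dict.empty with hd1
  have hkeys : d1.keys = PySem.List.dedup (dependencies.map (fun task => pvSucc task)) := by
    rw [hd1, PySem.Dict.keys_foldl_modify_key]
    simp [hsw, List.map_map, Function.comp_def, PySem.Set.update_nil_left]
  have hnd : d1.keys.Nodup := by
    rw [hkeys]; exact PySem.List.nodup_dedup _
  have hget : ∀ k, d1.getD k [] = (sw.filter (fun p => p.1 == k)).map (·.2) := by
    intro k
    rw [hd1, PySem.Dict.getD_foldl_modify_append]
    simp
  -- the second loop keeps the keys and sorts each value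
  set d2 := d1.keys.foldl
      (fun d key => d.modify key [] (fun v => PySem.List.sorted v (fun x => x) false)) d1 with hd2
  have hkeys2 : d2.keys = d1.keys := by
    rw [hd2, PySem.Dict.keys_foldl_modify]
    exact set_update_self _
  have hnd2 : d2.keys.Nodup := hkeys2 ▸ hnd
  rw [PySem.Dict.items_eq_map_keys d2 hnd2 [], hkeys2, hkeys]
  apply List.map_congr_left
  intro k hk
  have hmem : k ∈ d1.keys := hkeys ▸ hk
  rw [hd2, getD_foldl_modify_fun _ _ _ hnd k, if_pos hmem, hget k]
  simp [hsw, List.filter_map, List.map_map, Function.comp_def]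

-- ===== VERDICT (by name: the statement is the Claim_ definition above) =====
theorem convertDep2Pred_spec : Claim_equal_convertDep2Pred := by
  intro deps _ _
  exact convertDep2Pred_eq deps
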